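-- pv_equiv track=rewrite | github.com/Semeriuss/A2SV-Labs | contest_problems/code_forces_2/4. polycarp.py | polycarp
-- ===== SOURCE A (Python) =====
-- def polycarp(string):
--     r = False
--     last_char = string[0]
--     count = 0 if last_char == 'v' else 1
--     for i in range(1, len(string)):
--
--         if string[i] == 'w':
--             count += 1
--         elif string[i] == 'v' and last_char == 'v' and r == False:
--             count += 1
--             r = True
--         elif r == True:
--             r = False
--         last_char = string[i]
--
--
--
--     return count
-- ===== SOURCE B (Python) =====
-- def polycarp(string):
--     count = 0 if string[0] == 'v' else 1
--     count += string.count('w', 1)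
--     run = 0
--     for ch in string:
--         if ch == 'v':
--             run += 1
--         else:
--             count += run // 2
--             run = 0
--     return count + run // 2
-- ===== Notes on version B (the rewrite author's own statement) =====
-- stated objective: simpler
-- what changed: Replaces A's boolean pairing flag and last-char tracking with a direct w-count plus run-length accumulation of consecutive 'v's, adding run // 2 per run.
import Mathlib
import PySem

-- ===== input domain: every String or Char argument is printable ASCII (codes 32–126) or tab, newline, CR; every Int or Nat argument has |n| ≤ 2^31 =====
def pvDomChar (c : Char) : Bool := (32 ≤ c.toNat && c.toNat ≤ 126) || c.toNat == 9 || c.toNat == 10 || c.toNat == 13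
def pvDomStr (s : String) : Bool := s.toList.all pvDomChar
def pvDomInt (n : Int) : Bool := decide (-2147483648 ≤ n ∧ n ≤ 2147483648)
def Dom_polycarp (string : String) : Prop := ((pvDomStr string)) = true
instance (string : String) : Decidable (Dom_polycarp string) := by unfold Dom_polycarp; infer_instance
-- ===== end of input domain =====

-- B replaces A's boolean pairing flag with a w-count plus run-lengths of consecutive 'v's (run // 2 per run): simpler, same O(n) cost.

-- ===== PORT A =====
-- loop body of A: state (r, last_char, count), one step per character string[i], i ≥ 1
def pvStepA (st : Bool × Char × Int) (c : Char) : Bool × Char × Int :=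
  if c = 'w' then (st.1, c, st.2.2 + 1)
  else if c = 'v' ∧ st.2.1 = 'v' ∧ st.1 = false then (true, c, st.2.2 + 1)
  else if st.1 = true then (false, c, st.2.2)
  else (st.1, c, st.2.2)

def polycarp (string : String) : Int :=
  let cs := string.toList
  let last0 := cs.headD ' '      -- string[0]; Python raises IndexError on "" (excluded by Pre_)
  let count0 : Int := if last0 = 'v' then 0 else 1
  (cs.tail.foldl pvStepA (false, last0, count0)).2.2

-- ===== PORT B =====
-- loop body of B: state (count, run)
def pvStepB (st : Int × Int) (c : Char) : Int × Int :=
  if c = 'v' then (st.1, st.2 + 1) else (st.1 + PySem.Int.floordiv st.2 2, 0)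

def polycarp_alt (string : String) : Int :=
  let cs := string.toList
  let count0 : Int := (if cs.headD ' ' = 'v' then 0 else 1)   -- string[0]; raises on "" (excluded by Pre_)
                      + (cs.tail.countP (· == 'w') : Int)     -- string.count('w', 1)
  let p := cs.foldl pvStepB (count0, 0)
  p.1 + PySem.Int.floordiv p.2 2

-- ===== PRECONDITION & SPEC =====
-- A (and B) raise IndexError on the empty string (string[0]); Pre_ excludes exactly that input.
def Pre_polycarp (string : String) : Prop := string ≠ ""
instance (string : String) : Decidable (Pre_polycarp string) := by unfold Pre_polycarp; infer_instance
def pvWitness_polycarp : String := "vvwv"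

def Spec_polycarp (string : String) (out : Int) : Prop := out = polycarp_alt string
instance (string : String) (out : Int) : Decidable (Spec_polycarp string out) := by unfold Spec_polycarp; infer_instance

-- ===== CLAIM (what is proved, stated in full; the proofs are below) =====
def Claim_equal_polycarp : Prop := ∀ (string : String), Dom_polycarp string → Pre_polycarp string → Spec_polycarp string (polycarp string)

-- ===== LEMMAS AND PROOFS =====

-- pairing contribution of the remaining characters; p = "the next 'v' completes a pair"
def pvPair : List Char → Bool → Int
  | [], _ => 0
  | c :: t, p => if c = 'v' then (if p then 1 + pvPair t false else pvPair t true) else pvPair t false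

-- characterisation of A's loop: count grows by the number of 'w's plus the pairing contribution,
-- which depends on (r, last) only through (last = 'v' ∧ r = false)
theorem pvA_char (t : List Char) : ∀ (r : Bool) (last : Char) (count : Int),
    (t.foldl pvStepA (r, last, count)).2.2
      = count + (t.countP (· == 'w') : Int) + pvPair t (last == 'v' && !r) := by
  induction t with
  | nil => intro r last count; simp [pvPair]
  | cons c t ih =>
    intro r last count
    by_cases hw : c = 'w'
    · subst hw
      simp only [List.foldl_cons, pvStepA, if_pos rfl, ih, List.countP_cons, pvPair]
      simp; ring
    · by_cases hp : c = 'v' ∧ last = 'v' ∧ r = false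
      · obtain ⟨hc, hl, hr⟩ := hp; subst hc hl hr
        simp only [List.foldl_cons, pvStepA, ih, List.countP_cons, pvPair]
        simp [hw]; ring
      · cases r with
        | false =>  -- r = false: nothing changes except last_char
          have hp2 : c = 'v' → ¬ last = 'v' := fun a b => hp ⟨a, b, rfl⟩
          have hstep : pvStepA (false, last, count) c = (false, c, count) := by
            simp [pvStepA, hw]
            exact hp2
          rw [List.foldl_cons, hstep, ih]
          by_cases hv : c = 'v'
          · subst hv
            have hl : (last == 'v') = false := by
              simp only [beq_eq_false_iff_ne, ne_eq]
              exact fun h => hp ⟨rfl, h, rfl⟩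
            simp [List.countP_cons, hw, pvPair, hl]
          · have hc : (c == 'v') = false := by simp [hv]
            simp [List.countP_cons, hw, pvPair, hv, hc]
        | true =>  -- r = true: flag is cleared
          have hp' : ¬ (c = 'v' ∧ last = 'v' ∧ (true : Bool) = false) := by
            rintro ⟨_, _, h⟩; cases h
          have hstep : pvStepA (true, last, count) c = (false, c, count) := by
            simp [pvStepA, hw, hp']
          rw [List.foldl_cons, hstep, ih]
          by_cases hv : c = 'v'
          · simp [List.countP_cons, hw, pvPair, hv]
          · have hc : (c == 'v') = false := by simp [hv]
            simp [List.countP_cons, hw, pvPair, hv, hc]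

-- characterisation of B's loop: run-length splitting computes the same pairing contribution;
-- the phase "next 'v' pairs" is exactly "run is odd"
theorem pvB_char (t : List Char) : ∀ (tot run : Int), 0 ≤ run →
    (t.foldl pvStepB (tot, run)).1 + PySem.Int.floordiv (t.foldl pvStepB (tot, run)).2 2
      = tot + PySem.Int.floordiv run 2 + pvPair t (run % 2 == 1) := by
  induction t with
  | nil => intro tot run _; simp [pvPair]
  | cons c t ih =>
    intro tot run hrun
    by_cases hv : c = 'v'
    · subst hv
      have hstep : pvStepB (tot, run) 'v' = (tot, run + 1) := by simp [pvStepB]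
      rw [List.foldl_cons, hstep, ih tot (run + 1) (by omega)]
      by_cases hodd : run % 2 = 1
      · have h1 : (run + 1) % 2 = 0 := by omega
        simp [pvPair, hodd, h1]
        have h2 : (run + 1) / 2 = 1 + run / 2 := by omega
        rw [h2]; ring
      · have h0 : run % 2 = 0 := by omega
        have h1 : (run + 1) % 2 = 1 := by omega
        simp [pvPair, h0, h1]
        omega
    · have hstep : pvStepB (tot, run) c = (tot + PySem.Int.floordiv run 2, 0) := by
        simp [pvStepB, hv]
      rw [List.foldl_cons, hstep, ih (tot + PySem.Int.floordiv run 2) 0 le_rfl]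
      have h0 : PySem.Int.floordiv (0 : Int) 2 = 0 := by
        rw [PySem.Int.floordiv_eq_ediv_of_pos (by omega)]; decide
      simp [pvPair, hv, h0]

theorem pv_main (s : String) (c : Char) (t : List Char) (h : s.toList = c :: t) :
    polycarp s = polycarp_alt s := by
  simp only [polycarp, polycarp_alt, h, List.headD, List.tail_cons]
  rw [pvA_char, List.foldl_cons]
  have h0 : PySem.Int.floordiv (0 : Int) 2 = 0 := by
    rw [PySem.Int.floordiv_eq_ediv_of_pos (by omega)]; decide
  by_cases hv : c = 'v'
  · subst hv
    have hstep : ∀ tot : Int, pvStepB (tot, 0) 'v' = (tot, 1) := by intro tot; simp [pvStepB]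
    rw [hstep, pvB_char t _ 1 (by omega)]
    have h1 : PySem.Int.floordiv (1 : Int) 2 = 0 := by
      rw [PySem.Int.floordiv_eq_ediv_of_pos (by omega)]; decide
    simp [h1]
  · have hstep : ∀ tot : Int, pvStepB (tot, 0) c = (tot, 0) := by
      intro tot; simp [pvStepB, hv, h0]
    rw [hstep, pvB_char t _ 0 le_rfl]
    have hc : (c == 'v') = false := by simp [hv]
    simp [h0, hc]

-- ===== VERDICT (by name: the statement is the Claim_ definition above) =====
theorem polycarp_spec : Claim_equal_polycarp := by
  intro string _ hpre
  unfold Spec_polycarp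
  cases h : string.toList with
  | nil => exact absurd (String.toList_eq_nil_iff.mp h) hpre
  | cons c t => exact pv_main string c t h
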